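-- pv_equiv track=rewrite | github.com/nastyh/LeetCode | Basic Data Structures/788_Rotated_Digits.py | rotatedDigits_alt
-- ===== SOURCE A (Python) =====
-- def rotatedDigits_alt(N):
--     res = 0
--     for d in range(1, N + 1):
--         d = str(d)
--         if '3' in d or '4' in d or '7' in d:
--             continue
--         if '2' in d or '5' in d or '6' in d or '9' in d:
--             res += 1
--     return res
-- ===== SOURCE B (Python) =====
-- def rotatedDigits_alt(N):
--     # Digit DP: count(n, S) = how many x in [0, n] have all decimal digits in S.
--     # Answer = count with digits in {0,1,2,5,6,8,9} minus count with digits in {0,1,8}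
--     # (numbers that rotate to themselves), computed in O(log N) instead of scanning 1..N.
--     BIG = (0, 1, 2, 5, 6, 8, 9)
--     SMALL = (0, 1, 8)
--
--     def all_digits_in(n, S):
--         while n:
--             if n % 10 not in S:
--                 return False
--             n //= 10
--         return True
--
--     def count_upto(n, S):
--         if n < 0:
--             return 0
--         if n < 10:
--             return sum(1 for s in S if s <= n)
--         q, r = divmod(n, 10)
--         tight = sum(1 for s in S if s <= r) if all_digits_in(q, S) else 0
--         return count_upto(q - 1, S) * len(S) + tight
--
--     return count_upto(N, BIG) - count_upto(N, SMALL)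
-- ===== Notes on version B (the rewrite author's own statement) =====
-- stated objective: faster
-- what changed: A tests every number from one to N via its decimal string; B counts arithmetically with a digit DP over N's decimal digits: numbers whose digits are all rotatable minus numbers whose digits all rotate to themselves.
import Mathlib
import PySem

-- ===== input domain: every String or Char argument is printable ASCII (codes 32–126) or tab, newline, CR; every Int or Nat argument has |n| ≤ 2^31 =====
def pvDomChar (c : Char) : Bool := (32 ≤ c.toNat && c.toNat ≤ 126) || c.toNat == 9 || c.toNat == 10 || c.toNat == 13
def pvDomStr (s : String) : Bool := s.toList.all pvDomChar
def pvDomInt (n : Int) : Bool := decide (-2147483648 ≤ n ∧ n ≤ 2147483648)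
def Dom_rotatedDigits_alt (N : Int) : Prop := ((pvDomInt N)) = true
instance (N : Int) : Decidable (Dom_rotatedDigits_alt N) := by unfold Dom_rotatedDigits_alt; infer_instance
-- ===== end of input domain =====

-- B replaces A's per-number scan of 1..N (string test for each number) by a digit-DP count
-- over the decimal digits of N: count numbers whose digits all lie in a digit set, for two
-- sets, and subtract; same return value, proved below.


-- ===== PORT A =====
def rotatedDigits_alt (N : Int) : Int :=
  (PySem.List.pyRange 1 (N + 1) 1).foldl (fun res d =>
    let s := PySem.Int.toStr d
    if PySem.Str.isIn "3" s || PySem.Str.isIn "4" s || PySem.Str.isIn "7" s then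
      res
    else if PySem.Str.isIn "2" s || PySem.Str.isIn "5" s || PySem.Str.isIn "6" s || PySem.Str.isIn "9" s then
      res + 1
    else
      res) 0

-- ===== PORT B =====
-- helper all_digits_in(n, S); B only ever applies it to n ≥ 0, where this is exact
-- (Python's 'while n:' stops at n == 0)
def pvAllDigitsIn (n : Int) (S : List Int) : Bool :=
  if 0 < n then
    if S.contains (PySem.Int.mod n 10) then pvAllDigitsIn (PySem.Int.floordiv n 10) S else false
  else
    true
termination_by n.toNat
decreasing_by
  rw [PySem.Int.floordiv_eq_ediv_of_pos (by omega : (0:Int) < 10)]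
  omega

-- helper count_upto(n, S): how many x in [0, n] have all decimal digits in S
def pvCountUpto (n : Int) (S : List Int) : Int :=
  if n < 0 then 0
  else if n < 10 then ((S.filter (fun s => s ≤ n)).length : Int)
  else
    let q := PySem.Int.floordiv n 10
    let r := PySem.Int.mod n 10
    let tight := if pvAllDigitsIn q S then ((S.filter (fun s => s ≤ r)).length : Int) else 0
    pvCountUpto (q - 1) S * (S.length : Int) + tight
termination_by n.toNat
decreasing_by
  rw [PySem.Int.floordiv_eq_ediv_of_pos (by omega : (0:Int) < 10)]
  omega

def rotatedDigits_alt_alt (N : Int) : Int :=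
  pvCountUpto N [0, 1, 2, 5, 6, 8, 9] - pvCountUpto N [0, 1, 8]

-- ===== PRECONDITION & SPEC =====
def Spec_rotatedDigits_alt (N : Int) (out : Int) : Prop := out = rotatedDigits_alt_alt N
instance (N : Int) (out : Int) : Decidable (Spec_rotatedDigits_alt N out) := by unfold Spec_rotatedDigits_alt; infer_instance

-- ===== CLAIM (what is proved, stated in full; the proofs are below) =====
def Claim_equal_rotatedDigits_alt : Prop := ∀ (N : Int), Dom_rotatedDigits_alt N → Spec_rotatedDigits_alt N (rotatedDigits_alt N)

-- ===== LEMMAS AND PROOFS =====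

-- 'all decimal digits of n lie in S', on the Nat / Nat.digits side
def pvV (S : List Nat) (n : Nat) : Bool := (Nat.digits 10 n).all S.contains

-- how many x < m have all digits in S
def pvCnt (S : List Nat) (m : Nat) : Nat := (List.range m).countP (pvV S)

theorem pvV_step (S : List Nat) (h0 : S.contains 0 = true) (a b : Nat) (hb : b < 10) :
    pvV S (10 * a + b) = (S.contains b && pvV S a) := by
  unfold pvV
  by_cases ha : 10 * a + b = 0
  · have ha0 : a = 0 := by omega
    have hb0 : b = 0 := by omega
    subst ha0; subst hb0
    simp only [List.contains_eq_mem] at h0 ⊢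
    simp [Nat.digits_zero, h0]
  · rw [Nat.digits_def' (by norm_num : 1 < 10) (by omega : 0 < 10 * a + b)]
    have h1 : (10 * a + b) % 10 = b := by omega
    have h2 : (10 * a + b) / 10 = a := by omega
    simp [h1, h2]

theorem pvV_lt10 (S : List Nat) (h0 : S.contains 0 = true) (b : Nat) (hb : b < 10) :
    pvV S b = S.contains b := by
  have h := pvV_step S h0 0 b hb
  have h2 : pvV S 0 = true := by simp [pvV]
  rw [show 10 * 0 + b = b by ring] at h
  rw [h, h2, Bool.and_true]

theorem pvCnt_chunk (S : List Nat) (h0 : S.contains 0 = true) (q m : Nat) (hm : m ≤ 10) :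
    (List.countP (pvV S ∘ fun x => 10 * q + x) (List.range m))
      = if pvV S q then (List.range m).countP S.contains else 0 := by
  rw [List.countP_congr (q := fun x => S.contains x && pvV S q)
      (by intro x hx
          simp only [List.mem_range] at hx
          simp only [Function.comp_apply]
          rw [pvV_step S h0 q x (by omega)])]
  cases h : pvV S q
  · simp
  · simp only [Bool.and_true, if_true]

theorem pvCnt_block (S : List Nat) (h0 : S.contains 0 = true) (q : Nat) :
    pvCnt S (10 * q) = pvCnt S q * (List.range 10).countP S.contains := by
  induction q with
  | zero => simp [pvCnt]
  | succ q ih =>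
    have e : 10 * (q + 1) = 10 * q + 10 := by ring
    rw [e]
    unfold pvCnt at *
    rw [List.range_add, List.countP_append, ih, List.countP_map,
        pvCnt_chunk S h0 q 10 (le_refl _)]
    have hs : List.countP (pvV S) (List.range (q + 1))
        = List.countP (pvV S) (List.range q) + if pvV S q then 1 else 0 := by
      rw [List.range_succ, List.countP_append]
      simp [List.countP_cons]
    rw [hs, Nat.add_mul]
    cases h : pvV S q <;> simp

theorem pvCnt_split (S : List Nat) (h0 : S.contains 0 = true) (q r : Nat) (hr : r < 10) :
    pvCnt S (10 * q + r + 1) =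
      pvCnt S q * (List.range 10).countP S.contains +
        (if pvV S q then (List.range (r + 1)).countP S.contains else 0) := by
  have e : 10 * q + r + 1 = 10 * q + (r + 1) := by ring
  rw [e]
  unfold pvCnt
  rw [List.range_add, List.countP_append, List.countP_map,
      pvCnt_chunk S h0 q (r + 1) (by omega)]
  have hb := pvCnt_block S h0 q
  unfold pvCnt at hb
  rw [hb]

theorem pvCountP_sub {α : Type} (p q : α → Bool) (l : List α)
    (himp : ∀ x ∈ l, q x = true → p x = true) :
    (l.countP p : Int) - l.countP q = l.countP (fun x => p x && !q x) := by
  induction l with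
  | nil => simp
  | cons a t ih =>
    have ht : ∀ x ∈ t, q x = true → p x = true := fun x hx => himp x (List.mem_cons_of_mem a hx)
    have ha := himp a (List.mem_cons_self ..)
    have ih' := ih ht
    rw [List.countP_cons, List.countP_cons, List.countP_cons]
    cases hq : q a
    · cases hp : p a
      · push_cast
        simp
        omega
      · push_cast
        simp
        omega
    · have hp := ha hq
      rw [hp]
      push_cast
      simp
      omega

theorem pvAllDigitsIn_eq (S' : List Int) (S : List Nat) (h0 : S.contains 0 = true)
    (hS : ∀ b : Nat, b < 10 → S'.contains (b : Int) = S.contains b)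
    (n : Int) (hn : 0 ≤ n) : pvAllDigitsIn n S' = pvV S n.toNat := by
  generalize hm : n.toNat = m
  induction m using Nat.strong_induction_on generalizing n with
  | _ m ih =>
    rw [pvAllDigitsIn]
    by_cases hpos : 0 < n
    · have hm10 : PySem.Int.mod n 10 = ((m % 10 : Nat) : Int) := by
        rw [PySem.Int.mod_eq_emod_of_pos (by omega)]
        omega
      have hd10 : PySem.Int.floordiv n 10 = ((m / 10 : Nat) : Int) := by
        rw [PySem.Int.floordiv_eq_ediv_of_pos (by omega)]
        omega
      rw [if_pos hpos, hm10, hd10, hS _ (by omega),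
          ih (m / 10) (by omega) _ (by positivity) (by omega)]
      have hsplit : m = 10 * (m / 10) + m % 10 := by omega
      conv_rhs => rw [hsplit]
      rw [pvV_step S h0 _ _ (by omega)]
      cases S.contains (m % 10) <;> simp
    · have : m = 0 := by omega
      subst this
      rw [if_neg hpos]
      simp [pvV]

theorem pvCountUpto_eq (S' : List Int) (S : List Nat)
    (h0 : S.contains 0 = true)
    (hS : ∀ b : Nat, b < 10 → S'.contains (b : Int) = S.contains b)
    (hbase : ∀ k : Nat, k < 10 →
      (S'.filter (fun s => s ≤ (k : Int))).length = (List.range (k + 1)).countP S.contains)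
    (hlen : S'.length = (List.range 10).countP S.contains)
    (n : Int) (hn : 0 ≤ n) :
    pvCountUpto n S' = (pvCnt S (n.toNat + 1) : Nat) := by
  generalize hm : n.toNat = m
  induction m using Nat.strong_induction_on generalizing n with
  | _ m ih =>
    rw [pvCountUpto, if_neg (by omega)]
    by_cases hsm : n < 10
    · rw [if_pos hsm]
      have hn' : n = ((m : Nat) : Int) := by omega
      rw [hn', hbase m (by omega)]
      unfold pvCnt
      have hcc : List.countP (pvV S) (List.range (m + 1)) = List.countP S.contains (List.range (m + 1)) :=
        List.countP_congr (fun x hx => by rw [pvV_lt10 S h0 x (by simp at hx; omega)])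
      rw [hcc]
    · rw [if_neg hsm]
      simp only []
      have hq : PySem.Int.floordiv n 10 = ((m / 10 : Nat) : Int) := by
        rw [PySem.Int.floordiv_eq_ediv_of_pos (by omega)]
        omega
      have hr : PySem.Int.mod n 10 = ((m % 10 : Nat) : Int) := by
        rw [PySem.Int.mod_eq_emod_of_pos (by omega)]
        omega
      have hq1 : m / 10 ≥ 1 := by omega
      have hqm : (((m / 10 : Nat) : Int) - 1).toNat = m / 10 - 1 := by omega
      rw [hq, hr, pvAllDigitsIn_eq S' S h0 hS _ (by positivity),
          ih (m / 10 - 1) (by omega) _ (by omega) (by omega),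
          hbase (m % 10) (by omega), hlen]
      have hm' : m = 10 * (m / 10) + m % 10 := by omega
      have hstep : pvCnt S (m + 1) = pvCnt S (10 * (m / 10) + m % 10 + 1) := by rw [← hm']
      rw [hstep, pvCnt_split S h0 _ _ (by omega)]
      rw [Int.toNat_natCast, show m / 10 - 1 + 1 = m / 10 by omega]
      push_cast
      cases pvV S (m / 10) <;> simp

theorem pvDigitChar_inj (k n : Nat) (hk : k < 10) (hn : n < 10) :
    Nat.digitChar k = Nat.digitChar n ↔ k = n := by
  interval_cases k <;> interval_cases n <;> simp [Nat.digitChar]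

theorem pvMem_toDigits (k n : Nat) (hk : k < 10) :
    (Nat.digitChar k ∈ Nat.toDigits 10 n) ↔ (k ∈ Nat.digits 10 n ∨ (n = 0 ∧ k = 0)) := by
  induction n using Nat.strong_induction_on with
  | _ n ih =>
    by_cases hlt : n < 10
    · rw [Nat.toDigits_of_lt_base hlt]
      rcases Nat.eq_zero_or_pos n with h0 | hpos
      · subst h0
        simp [pvDigitChar_inj k 0 hk (by omega)]
      · rw [Nat.digits_def' (by norm_num : 1 < 10) hpos]
        have : Nat.digits 10 (n / 10) = [] := by
          rw [Nat.div_eq_of_lt hlt]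
          simp
        rw [Nat.mod_eq_of_lt hlt, this]
        simp [pvDigitChar_inj k n hk hlt]
        omega
    · rw [Nat.toDigits_of_base_le (by norm_num) (by omega),
          Nat.digits_def' (by norm_num : 1 < 10) (by omega)]
      have hq10 : n / 10 < n := by omega
      rw [List.mem_append, List.mem_singleton, List.mem_cons,
          ih (n / 10) hq10, pvDigitChar_inj k (n % 10) hk (by omega)]
      have hne : ¬(n / 10 = 0) := by omega
      have hne' : ¬(n = 0) := by omega
      tauto

theorem pvD1 (L : List Nat) (hL : ∀ x ∈ L, x < 10) :
    L.all ([0,1,2,5,6,8,9] : List Nat).contains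
      = (!(L.contains 3) && !(L.contains 4) && !(L.contains 7)) := by
  induction L with
  | nil => simp
  | cons h t ih =>
    have hh : h < 10 := hL h (List.mem_cons_self ..)
    have ht : ∀ x ∈ t, x < 10 := fun x hx => hL x (List.mem_cons_of_mem h hx)
    rw [List.all_cons, ih ht]
    simp only [List.contains_cons]
    interval_cases h <;> simp

theorem pvD2 (L : List Nat) (hL : ∀ x ∈ L, x < 10)
    (hB : L.all ([0,1,2,5,6,8,9] : List Nat).contains = true) :
    (L.contains 2 || L.contains 5 || L.contains 6 || L.contains 9)
      = !(L.all ([0,1,8] : List Nat).contains) := by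
  induction L with
  | nil => simp
  | cons h t ih =>
    have hh : h < 10 := hL h (List.mem_cons_self ..)
    have ht : ∀ x ∈ t, x < 10 := fun x hx => hL x (List.mem_cons_of_mem h hx)
    rw [List.all_cons] at hB
    have hB1 := (Bool.and_eq_true_iff.mp hB).1
    have hB2 := (Bool.and_eq_true_iff.mp hB).2
    rw [List.all_cons]
    simp only [List.contains_cons]
    interval_cases h <;> simp_all

theorem pvDigitLogic (L : List Nat) (hL : ∀ x ∈ L, x < 10) :
    ((!(L.contains 3) && !(L.contains 4) && !(L.contains 7)) &&
      (L.contains 2 || L.contains 5 || L.contains 6 || L.contains 9))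
    = (L.all ([0,1,2,5,6,8,9] : List Nat).contains && !(L.all ([0,1,8] : List Nat).contains)) := by
  rw [← pvD1 L hL]
  cases hB : L.all ([0,1,2,5,6,8,9] : List Nat).contains
  · simp
  · simp only [Bool.true_and]
    exact pvD2 L hL hB

-- A's per-number test as a single predicate
def pvPA (d : Int) : Bool :=
  (!(PySem.Str.isIn "3" (PySem.Int.toStr d)) && !(PySem.Str.isIn "4" (PySem.Int.toStr d)) &&
    !(PySem.Str.isIn "7" (PySem.Int.toStr d))) &&
  (PySem.Str.isIn "2" (PySem.Int.toStr d) || PySem.Str.isIn "5" (PySem.Int.toStr d) ||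
    PySem.Str.isIn "6" (PySem.Int.toStr d) || PySem.Str.isIn "9" (PySem.Int.toStr d))

theorem pvIsIn_digit (sub : String) (k : Nat) (hk : k < 10)
    (hsub : sub.toList = [Nat.digitChar k]) (d : Int) (hd : 1 ≤ d) :
    PySem.Str.isIn sub (PySem.Int.toStr d) = (Nat.digits 10 d.toNat).contains k := by
  rw [Bool.eq_iff_iff, PySem.Str.isIn_iff_infix, PySem.Int.toList_toStr, hsub]
  unfold PySem.Int.toChars
  rw [if_neg (by omega), List.singleton_infix_iff, List.contains_iff_mem,
      pvMem_toDigits k d.toNat hk]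
  have : ¬(d.toNat = 0) := by omega
  tauto

theorem pvPA_eq (d : Int) (hd : 1 ≤ d) :
    pvPA d = (pvV [0,1,2,5,6,8,9] d.toNat && !(pvV [0,1,8] d.toNat)) := by
  unfold pvPA pvV
  rw [pvIsIn_digit "3" 3 (by omega) (by decide) d hd,
      pvIsIn_digit "4" 4 (by omega) (by decide) d hd,
      pvIsIn_digit "7" 7 (by omega) (by decide) d hd,
      pvIsIn_digit "2" 2 (by omega) (by decide) d hd,
      pvIsIn_digit "5" 5 (by omega) (by decide) d hd,
      pvIsIn_digit "6" 6 (by omega) (by decide) d hd,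
      pvIsIn_digit "9" 9 (by omega) (by decide) d hd]
  exact pvDigitLogic _ (fun x hx => Nat.digits_lt_base (by norm_num) hx)

theorem pvIte (a b c d e f g : Bool) (acc : Int) :
    (if (a || b || c) then acc else if (d || e || f || g) then acc + 1 else acc)
      = if ((!a && !b && !c) && (d || e || f || g)) then acc + 1 else acc := by
  cases a <;> cases b <;> cases c <;> cases d <;> cases e <;> cases f <;> cases g <;> simp

theorem pvA_eq_countP (N : Int) :
    rotatedDigits_alt N = ((PySem.List.pyRange 1 (N + 1) 1).countP pvPA : Int) := by
  unfold rotatedDigits_alt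
  have h1 := PySem.List.foldl_congr_mem
      (l := PySem.List.pyRange 1 (N + 1) 1) (init := (0 : Int))
      (f := fun res d =>
        let s := PySem.Int.toStr d
        if PySem.Str.isIn "3" s || PySem.Str.isIn "4" s || PySem.Str.isIn "7" s then
          res
        else if PySem.Str.isIn "2" s || PySem.Str.isIn "5" s || PySem.Str.isIn "6" s || PySem.Str.isIn "9" s then
          res + 1
        else
          res)
      (g := fun res d => if pvPA d then res + 1 else res)
      (by intro acc x hx
          simp only [pvPA]
          exact pvIte _ _ _ _ _ _ _ acc)
  rw [h1, PySem.List.foldl_if_add_one]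
  simp

theorem pvV_mono (x : Nat) (h : pvV [0,1,8] x = true) : pvV [0,1,2,5,6,8,9] x = true := by
  simp only [pvV, List.all_eq_true] at h ⊢
  intro a ha
  have := h a ha
  simp only [List.contains_eq_mem, decide_eq_true_eq, List.mem_cons, List.not_mem_nil] at this ⊢
  tauto

theorem pvMain (N : Int) : rotatedDigits_alt N = rotatedDigits_alt_alt N := by
  by_cases hN : N < 0
  · rw [pvA_eq_countP, PySem.List.pyRange_one_eq_nil (by omega)]
    unfold rotatedDigits_alt_alt
    rw [pvCountUpto, pvCountUpto, if_pos hN, if_pos hN]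
    norm_num
  · have hn : 0 ≤ N := by omega
    have h0B : ([0,1,2,5,6,8,9] : List Nat).contains 0 = true := by decide
    have h0S : ([0,1,8] : List Nat).contains 0 = true := by decide
    rw [pvA_eq_countP, PySem.List.pyRange_one, show N + 1 - 1 = N by ring, List.countP_map]
    rw [List.countP_congr (q := fun k => pvV [0,1,2,5,6,8,9] (k+1) && !(pvV [0,1,8] (k+1)))
      (by intro k _
          simp only [Function.comp_apply]
          rw [pvPA_eq (1 + (k : Int)) (by omega), show ((1 + (k : Int)).toNat) = k + 1 by omega])]
    unfold rotatedDigits_alt_alt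
    rw [pvCountUpto_eq [0,1,2,5,6,8,9] [0,1,2,5,6,8,9] h0B
          (by decide) (by decide) (by decide) N hn,
        pvCountUpto_eq [0,1,8] [0,1,8] h0S
          (by decide) (by decide) (by decide) N hn]
    unfold pvCnt
    rw [pvCountP_sub (pvV [0,1,2,5,6,8,9]) (pvV [0,1,8]) _
          (fun x _ => pvV_mono x)]
    rw [List.range_succ_eq_map, List.countP_cons, List.countP_map]
    have hzero : (pvV [0,1,2,5,6,8,9] 0 && !pvV [0,1,8] 0) = false := by decide
    rw [hzero]
    norm_num [Function.comp_def]

-- ===== VERDICT (by name: the statement is the Claim_ definition above) =====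
theorem rotatedDigits_alt_spec : Claim_equal_rotatedDigits_alt := by
  intro N _
  unfold Spec_rotatedDigits_alt
  exact pvMain N
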